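-- pv_equiv track=rewrite | github.com/adhithadias/tensor-schedules | src/solver_config.py | __get_num_common_loops
-- ===== SOURCE A (Python) =====
-- def __get_num_common_loops(loop_sets:list) -> int:
--     assert type(loop_sets) == list
--
--     min_length = min(len(x) for x in loop_sets)
--     shared_length = min_length
--     while True:
--         common_indices = set.intersection(*[set(x[:shared_length]) for x in loop_sets])
--         if len(common_indices) == shared_length: return shared_length
--         else: shared_length = len(common_indices)
-- ===== SOURCE B (Python) =====
-- def __get_num_common_loops(loop_sets: list) -> int:
--     assert type(loop_sets) == list
--
--     m = min(len(x) for x in loop_sets)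
--     # first-occurrence index (1-based) of each element, per list
--     firsts = []
--     for x in loop_sets:
--         d = {}
--         for i, e in enumerate(x):
--             if e not in d:
--                 d[e] = i + 1
--         firsts.append(d)
--     # arrival time T(e) = max over lists of the first occurrence of e; bucket-count them
--     counts = {}
--     for e in firsts[0]:
--         t = 0
--         for d in firsts:
--             if e not in d:
--                 t = None
--                 break
--             t = max(t, d[e])
--         if t is not None and t <= m:
--             counts[t] = counts.get(t, 0) + 1
--     # k is achievable iff exactly k elements have arrived by k; take the largest such k
--     ans = 0
--     full = 0
--     for k in range(1, m + 1):
--         full += counts.get(k, 0)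
--         if full == k:
--             ans = k
--     return ans
-- ===== Notes on version B (the rewrite author's own statement) =====
-- stated objective: alternative
-- what changed: Replaces A's fixed-point iteration that repeatedly recomputes set.intersection of prefix sets (shrinking shared_length until the intersection size equals it) by a single-pass counting algorithm: per-list first-occurrence dictionaries, a bucket count of each common element's 'arrival time' (max first occurrence over all lists), and one arithmetic scan over k=1..min_length tracking the largest k with exactly k elements arrived; it trades A's possibly repeated intersection passes for fixed dictionary bookkeeping.
import Mathlib
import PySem

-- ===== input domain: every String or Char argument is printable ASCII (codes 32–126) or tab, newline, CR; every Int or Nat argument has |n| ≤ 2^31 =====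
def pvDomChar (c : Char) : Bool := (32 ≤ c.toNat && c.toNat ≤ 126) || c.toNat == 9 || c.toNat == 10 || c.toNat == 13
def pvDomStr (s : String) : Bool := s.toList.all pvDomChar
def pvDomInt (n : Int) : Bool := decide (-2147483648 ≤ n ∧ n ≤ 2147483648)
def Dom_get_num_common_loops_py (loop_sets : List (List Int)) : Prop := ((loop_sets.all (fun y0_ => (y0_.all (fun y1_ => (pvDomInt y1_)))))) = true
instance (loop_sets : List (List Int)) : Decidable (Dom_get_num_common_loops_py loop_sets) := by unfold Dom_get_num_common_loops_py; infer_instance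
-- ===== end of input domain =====

-- B replaces A's repeated set-intersection fixed-point iteration by a different single-pass algorithm:
-- per-list first-occurrence indices, bucket-counted "arrival times", then one arithmetic scan (objective: alternative).

-- ===== PORT A =====
-- set.intersection(*ss) for a nonempty list of sets; [] is unreachable under Pre_ (Python would raise TypeError)
def pyInterAll (ss : List (PySem.Set Int)) : PySem.Set Int :=
  match ss with
  | [] => PySem.Set.empty
  | s :: rest => rest.foldl (fun a b => PySem.Set.inter a b) s

-- the 'while True' loop; fuel only makes the recursion total, it never runs out under Pre_
def aLoop (loop_sets : List (List Int)) : Nat → Int → Int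
  | 0, sl => sl
  | fuel + 1, sl =>
    let common := pyInterAll (loop_sets.map (fun x => PySem.Set.ofList (PySem.List.slice x none (some sl))))
    if (common.length : Int) = sl then sl
    else aLoop loop_sets fuel (common.length : Int)

def get_num_common_loops_py (loop_sets : List (List Int)) : Int :=
  match PySem.List.min? (loop_sets.map (fun x => (x.length : Int))) (fun v => v) with
  | none => 0  -- Python: min() of an empty sequence raises ValueError; excluded by Pre_
  | some m => aLoop loop_sets (m.toNat + 1) m

-- ===== PORT B =====
-- d = {}; for i, e in enumerate(x): if e not in d: d[e] = i + 1
def bFirst (x : List Int) : PySem.Dict Int Int :=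
  (PySem.List.enumerate x).foldl
    (fun d p => if d.contains p.2 then d else d.insert p.2 (p.1 + 1)) PySem.Dict.empty

-- t = 0; for d in firsts: if e not in d: t = None; break; t = max(t, d[e])
def bT (firsts : List (PySem.Dict Int Int)) (e : Int) : Option Int :=
  firsts.foldl (fun acc d =>
    match acc with
    | none => none
    | some t =>
      match d.get? e with
      | none => none
      | some v => some (max t v)) (some 0)

-- counts = {}; for e in firsts[0]: … counts[t] = counts.get(t, 0) + 1
def bCounts (firsts : List (PySem.Dict Int Int)) (m : Int) : PySem.Dict Int Int :=
  ((firsts.headD PySem.Dict.empty).keys).foldl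
    (fun c e =>
      match bT firsts e with
      | none => c
      | some t => if t ≤ m then c.insert t (c.getD t 0 + 1) else c)
    PySem.Dict.empty

def get_num_common_loops_py_alt (loop_sets : List (List Int)) : Int :=
  match PySem.List.min? (loop_sets.map (fun x => (x.length : Int))) (fun v => v) with
  | none => 0  -- Python: min() of an empty sequence raises ValueError; excluded by Pre_
  | some m =>
    let counts := bCounts (loop_sets.map bFirst) m
    ((PySem.List.pyRange 1 (m + 1) 1).foldl
      (fun st k =>
        let full := st.2 + counts.getD k 0
        (if full = k then k else st.1, full))
      ((0 : Int), (0 : Int))).1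

-- ===== PRECONDITION & SPEC =====
-- Pre_ excludes only the empty outer list, on which Python's min() raises ValueError (in both A and B).
def Pre_get_num_common_loops_py (loop_sets : List (List Int)) : Prop := loop_sets ≠ []
instance (loop_sets : List (List Int)) : Decidable (Pre_get_num_common_loops_py loop_sets) := by
  unfold Pre_get_num_common_loops_py; infer_instance

def pvWitness_get_num_common_loops_py : List (List Int) := [[1, 2, 3], [2, 1, 3]]

def Spec_get_num_common_loops_py (loop_sets : List (List Int)) (out : Int) : Prop := out = get_num_common_loops_py_alt loop_sets
instance (loop_sets : List (List Int)) (out : Int) : Decidable (Spec_get_num_common_loops_py loop_sets out) := by unfold Spec_get_num_common_loops_py; infer_instance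

-- ===== CLAIM (what is proved, stated in full; the proofs are below) =====
def Claim_equal_get_num_common_loops_py : Prop := ∀ (loop_sets : List (List Int)), Dom_get_num_common_loops_py loop_sets → Pre_get_num_common_loops_py loop_sets → Spec_get_num_common_loops_py loop_sets (get_num_common_loops_py loop_sets)

-- ===== LEMMAS AND PROOFS =====

-- 1-based position of the first occurrence of e in x (pure spec of what bFirst stores)
def firstPos (x : List Int) (e : Int) : Option Int :=
  match x with
  | [] => none
  | a :: x' => if a = e then some 1 else (firstPos x' e).map (· + 1)

-- FA ls k = len(set.intersection(*[set(x[:k]) for x in ls])) — the quantity A's loop recomputes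
def FA (ls : List (List Int)) (k : Int) : Int :=
  ((pyInterAll (ls.map (fun x => PySem.Set.ofList (PySem.List.slice x none (some k))))).length : Int)

-- gT ls m e = the bucket B files e into (None / filtered by t ≤ m)
def gT (ls : List (List Int)) (m e : Int) : Option Int :=
  match bT (ls.map bFirst) e with
  | none => none
  | some t => if t ≤ m then some t else none

-- the multiset of arrival times B counts
def Tlist (x0 : List Int) (rest : List (List Int)) (m : Int) : List Int :=
  ((bFirst x0).keys).filterMap (gT (x0 :: rest) m)

-- "r is the greatest fixed point of FA ls below k"
def IsG (ls : List (List Int)) (k r : Int) : Prop :=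
  0 ≤ r ∧ r ≤ k ∧ FA ls r = r ∧ ∀ j, 0 ≤ j → j ≤ k → FA ls j = j → j ≤ r

theorem isG_unique {ls : List (List Int)} {k r1 r2 : Int}
    (h1 : IsG ls k r1) (h2 : IsG ls k r2) : r1 = r2 := by
  obtain ⟨a1, b1, c1, d1⟩ := h1
  obtain ⟨a2, b2, c2, d2⟩ := h2
  exact le_antisymm (d2 r1 a1 b1 c1) (d1 r2 a2 b2 c2)

theorem firstPos_pos {x : List Int} {e t : Int} (h : firstPos x e = some t) : 1 ≤ t := by
  induction x generalizing t with
  | nil => simp [firstPos] at h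
  | cons a x' ih =>
    by_cases hae : a = e
    · simp [firstPos, hae] at h; omega
    · simp [firstPos, hae] at h
      obtain ⟨t', ht', rfl⟩ := h
      have := ih ht'; omega
theorem mem_take_iff_firstPos (x : List Int) (e : Int) (n : Nat) :
    e ∈ x.take n ↔ ∃ t, firstPos x e = some t ∧ t ≤ (n : Int) := by
  induction x generalizing n with
  | nil => simp [firstPos]
  | cons a x' ih =>
    cases n with
    | zero =>
      simp only [List.take_zero, List.not_mem_nil, false_iff]
      rintro ⟨t, ht, htle⟩
      have := firstPos_pos ht; omega
    | succ n =>
      by_cases hae : a = e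
      · simp only [List.take_succ_cons, List.mem_cons, firstPos, if_pos hae]
        constructor
        · intro; exact ⟨1, rfl, by push_cast; omega⟩
        · intro; left; exact hae.symm
      · simp only [List.take_succ_cons, List.mem_cons, firstPos, if_neg hae]
        rw [ih n]
        constructor
        · rintro (h | ⟨t, ht, htle⟩)
          · exact absurd h.symm hae
          · exact ⟨t + 1, by simp [ht], by push_cast; omega⟩
        · rintro ⟨t, ht, htle⟩
          simp only [Option.map_eq_some_iff] at ht
          obtain ⟨t', ht', rfl⟩ := ht
          right; exact ⟨t', ht', by push_cast at htle ⊢; omega⟩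
theorem bFirst_gen (x : List Int) (e : Int) : ∀ (s : Int) (d : PySem.Dict Int Int),
    (((PySem.List.enumerate x s).foldl
      (fun d p => if d.contains p.2 then d else d.insert p.2 (p.1 + 1)) d).get? e)
    = if (d.get? e).isSome then d.get? e else (firstPos x e).map (· + s) := by
  induction x with
  | nil =>
    intro s d
    simp only [PySem.List.enumerate_nil, List.foldl_nil, firstPos, Option.map_none]
    cases h : d.get? e <;> simp [h]
  | cons a x' ih =>
    intro s d
    rw [PySem.List.enumerate_cons, List.foldl_cons]
    by_cases hc : d.contains a
    · rw [if_pos hc, ih]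
      have hs : (d.get? a).isSome := by
        rw [← PySem.Dict.contains_eq_isSome_get?]; exact hc
      by_cases hae : a = e
      · subst hae
        simp [hs]
      · simp only [firstPos, if_neg hae]
        cases hfp : firstPos x' e <;> cases hde : d.get? e <;>
          simp [hfp, hde] <;> ring
    · rw [if_neg hc, ih]
      by_cases hae : a = e
      · subst hae
        have hde : d.get? a = none := by
          rw [PySem.Dict.get?_eq_none_iff_contains]; simp [hc]
        simp [PySem.Dict.get?_insert_self, hde, firstPos]
        ring
      · have hne : (d.insert a (s + 1)).get? e = d.get? e := by
          rw [PySem.Dict.get?_insert]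
          rw [if_neg (fun h => hae h.symm)]
        rw [hne]
        simp only [firstPos, if_neg hae]
        cases hfp : firstPos x' e <;> cases hde : d.get? e <;>
          simp [hfp, hde] <;> ring

theorem bFirst_get? (x : List Int) (e : Int) : (bFirst x).get? e = firstPos x e := by
  unfold bFirst
  rw [bFirst_gen]
  simp [PySem.Dict.get?_empty]
theorem keys_bFirst_gen (x : List Int) : ∀ (s : Int) (d : PySem.Dict Int Int),
    ((PySem.List.enumerate x s).foldl
      (fun d p => if d.contains p.2 then d else d.insert p.2 (p.1 + 1)) d).keys
    = PySem.Set.update d.keys x := by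
  induction x with
  | nil => intro s d; simp [PySem.List.enumerate_nil, PySem.Set.update_nil]
  | cons a x' ih =>
    intro s d
    rw [PySem.List.enumerate_cons, List.foldl_cons, PySem.Set.update_cons]
    by_cases hc : d.contains a
    · rw [if_pos hc, ih]
      congr 1
      rw [PySem.Set.add_of_mem]
      rw [← PySem.Dict.contains_iff_mem_keys]; exact hc
    · rw [if_neg hc, ih]
      congr 1
      rw [PySem.Dict.keys_insert_of_not_contains (h := by simpa using hc),
        PySem.Set.add_of_not_mem]
      intro hmem
      exact hc ((PySem.Dict.contains_iff_mem_keys _ _).mpr hmem)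

theorem keys_bFirst (x : List Int) : (bFirst x).keys = PySem.Set.ofList x := by
  unfold bFirst
  rw [keys_bFirst_gen]
  simp [PySem.Dict.keys_empty, PySem.Set.update_nil_left]

theorem bT_none (ds : List (PySem.Dict Int Int)) (e : Int) :
    ds.foldl (fun acc d =>
      match acc with
      | none => none
      | some t =>
        match d.get? e with
        | none => none
        | some v => some (max t v)) none = none := by
  induction ds with
  | nil => rfl
  | cons d ds ih => simpa using ih

theorem bT_le_iff (ds : List (PySem.Dict Int Int)) (e k : Int) : ∀ (t0 : Int),
    (∃ t, ds.foldl (fun acc d =>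
      match acc with
      | none => none
      | some t =>
        match d.get? e with
        | none => none
        | some v => some (max t v)) (some t0) = some t ∧ t ≤ k) ↔
    (t0 ≤ k ∧ ∀ d ∈ ds, ∃ v, d.get? e = some v ∧ v ≤ k) := by
  induction ds with
  | nil => intro t0; simp
  | cons d ds ih =>
    intro t0
    rw [List.foldl_cons]
    cases hdv : d.get? e with
    | none =>
      simp only [hdv]
      rw [bT_none]
      simp [hdv]
    | some v =>
      simp only [hdv]
      rw [ih]
      constructor
      · rintro ⟨hm, hall⟩
        rw [max_le_iff] at hm
        exact ⟨hm.1, by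
          intro d' hd'
          rcases List.mem_cons.mp hd' with h | h
          · subst h; exact ⟨v, hdv, hm.2⟩
          · exact hall d' h⟩
      · rintro ⟨h0, hall⟩
        obtain ⟨v', hv', hvk⟩ := hall d (by simp)
        rw [hdv] at hv'
        obtain rfl : v = v' := by injection hv'
        exact ⟨max_le h0 hvk, fun d' hd' => hall d' (by simp [hd'])⟩

theorem bT_mono (ds : List (PySem.Dict Int Int)) (e : Int) : ∀ (t0 t : Int),
    ds.foldl (fun acc d =>
      match acc with
      | none => none
      | some t =>
        match d.get? e with
        | none => none
        | some v => some (max t v)) (some t0) = some t → t0 ≤ t := by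
  induction ds with
  | nil => intro t0 t h; simp at h; omega
  | cons d ds ih =>
    intro t0 t h
    rw [List.foldl_cons] at h
    cases hdv : d.get? e with
    | none =>
      simp only [hdv] at h
      rw [bT_none] at h; cases h
    | some v =>
      simp only [hdv] at h
      have := ih (max t0 v) t h
      have : t0 ≤ max t0 v := le_max_left _ _
      omega
theorem bT_one_le {x0 : List Int} {rest : List (List Int)} {e t : Int}
    (h : bT ((x0 :: rest).map bFirst) e = some t) : 1 ≤ t := by
  unfold bT at h
  rw [List.map_cons, List.foldl_cons] at h
  cases hdv : (bFirst x0).get? e with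
  | none => simp only [hdv] at h; rw [bT_none] at h; cases h
  | some v =>
    simp only [hdv] at h
    have hv : 1 ≤ v := firstPos_pos (by rw [← bFirst_get?]; exact hdv)
    have := bT_mono _ _ _ _ h
    have : v ≤ max 0 v := le_max_right _ _
    omega
theorem mem_foldl_inter (Ss : List (PySem.Set Int)) (y : Int) : ∀ (S0 : PySem.Set Int),
    (y ∈ Ss.foldl (fun a b => PySem.Set.inter a b) S0 ↔ y ∈ S0 ∧ ∀ s ∈ Ss, y ∈ s) := by
  induction Ss with
  | nil => intro S0; simp
  | cons s Ss ih =>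
    intro S0
    rw [List.foldl_cons, ih]
    rw [PySem.Set.mem_inter]
    constructor
    · rintro ⟨⟨h0, hs⟩, hall⟩
      refine ⟨h0, ?_⟩
      intro s' hs'
      rcases List.mem_cons.mp hs' with h | h
      · subst h; exact hs
      · exact hall s' h
    · rintro ⟨h0, hall⟩
      exact ⟨⟨h0, hall s (by simp)⟩, fun s' h => hall s' (by simp [h])⟩
theorem nodup_foldl_inter (Ss : List (PySem.Set Int)) : ∀ (S0 : PySem.Set Int), S0.Nodup →
    (Ss.foldl (fun a b => PySem.Set.inter a b) S0).Nodup := by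
  induction Ss with
  | nil => intro S0 h; simpa using h
  | cons s Ss ih =>
    intro S0 h
    rw [List.foldl_cons]
    exact ih _ (PySem.Set.nodup_inter S0 s h)
theorem length_eq_of_nodup_iff {L1 L2 : List Int} (h1 : L1.Nodup) (h2 : L2.Nodup)
    (h : ∀ a, a ∈ L1 ↔ a ∈ L2) : L1.length = L2.length := by
  rw [← List.toFinset_card_of_nodup h1, ← List.toFinset_card_of_nodup h2]
  congr 1
  ext a
  simp [h a]

theorem length_le_of_nodup_sub {L1 L2 : List Int} (h1 : L1.Nodup) (h2 : L2.Nodup)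
    (h : ∀ a, a ∈ L1 → a ∈ L2) : L1.length ≤ L2.length := by
  rw [← List.toFinset_card_of_nodup h1, ← List.toFinset_card_of_nodup h2]
  apply Finset.card_le_card
  intro a ha
  simp only [List.mem_toFinset] at *
  exact h a ha
theorem countP_filterMap_opt (g : Int → Option Int) (p : Int → Bool) (l : List Int) :
    (l.filterMap g).countP p = l.countP (fun e => match g e with | some t => p t | none => false) := by
  induction l with
  | nil => rfl
  | cons a l ih =>
    rw [List.filterMap_cons]
    cases hg : g a with
    | none => rw [List.countP_cons, ih]; simp [hg]
    | some t => rw [List.countP_cons, List.countP_cons, ih]; simp [hg]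

theorem FA_eq_countP (x0 : List Int) (rest : List (List Int)) (m k : Int)
    (hk0 : 0 ≤ k) (hkm : k ≤ m) :
    FA (x0 :: rest) k = ((Tlist x0 rest m).countP (fun t => decide (t ≤ k)) : Int) := by
  have hslice : ∀ x : List Int, PySem.List.slice x none (some k) = x.take k.toNat := by
    intro x; exact PySem.List.slice_to x hk0
  unfold FA Tlist
  rw [countP_filterMap_opt, keys_bFirst, List.countP_eq_length_filter]
  norm_cast
  show (pyInterAll ((x0 :: rest).map
      (fun x => PySem.Set.ofList (PySem.List.slice x none (some k))))).length = _
  rw [List.map_cons]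
  show ((rest.map (fun x => PySem.Set.ofList (PySem.List.slice x none (some k)))).foldl
      (fun a b => PySem.Set.inter a b) (PySem.Set.ofList (PySem.List.slice x0 none (some k)))).length = _
  apply length_eq_of_nodup_iff
  · exact nodup_foldl_inter _ _ (PySem.Set.nodup_ofList _)
  · exact ((PySem.Set.nodup_ofList x0).filter _)
  · intro a
    rw [mem_foldl_inter, List.mem_filter, PySem.Set.mem_ofList, PySem.Set.mem_ofList, hslice]
    constructor
    · rintro ⟨h0, hall⟩
      have hmem : ∀ x ∈ (x0 :: rest), a ∈ x.take k.toNat := by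
        intro x hx
        rcases List.mem_cons.mp hx with hh | hh
        · subst hh; exact h0
        · have := hall (PySem.Set.ofList (PySem.List.slice x none (some k)))
            (List.mem_map.mpr ⟨x, hh, rfl⟩)
          rwa [PySem.Set.mem_ofList, hslice] at this
      refine ⟨List.mem_of_mem_take h0, ?_⟩
      have hex : ∃ t, bT ((x0 :: rest).map bFirst) a = some t ∧ t ≤ k := by
        unfold bT
        rw [bT_le_iff]
        refine ⟨hk0, ?_⟩
        intro d hd
        obtain ⟨x, hx, rfl⟩ := List.mem_map.mp hd
        have := hmem x hx
        rw [mem_take_iff_firstPos] at this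
        obtain ⟨t, ht, htle⟩ := this
        exact ⟨t, by rw [bFirst_get?]; exact ht, by rwa [Int.toNat_of_nonneg hk0] at htle⟩
      obtain ⟨t, ht, htk⟩ := hex
      have hg : gT (x0 :: rest) m a = some t := by
        unfold gT; rw [ht]; simp [le_trans htk hkm]
      simp only [hg]
      simpa using htk
    · rintro ⟨h0, hq⟩
      unfold gT at hq
      simp only [List.map_cons] at hq
      cases hbt : bT (bFirst x0 :: List.map bFirst rest) a with
      | none => simp [hbt] at hq
      | some t =>
        simp only [hbt] at hq
        by_cases htm : t ≤ m
        · simp only [if_pos htm, decide_eq_true_eq] at hq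
          have hall : ∀ x ∈ (x0 :: rest), a ∈ x.take k.toNat := by
            have := (bT_le_iff (bFirst x0 :: List.map bFirst rest) a k 0).mp
              ⟨t, by unfold bT at hbt; exact hbt, hq⟩
            intro x hx
            have hmem : bFirst x ∈ (bFirst x0 :: List.map bFirst rest) := by
              rcases List.mem_cons.mp hx with hh | hh
              · subst hh; simp
              · simp [List.mem_map.mpr ⟨x, hh, rfl⟩]
            obtain ⟨v, hv, hvk⟩ := this.2 (bFirst x) hmem
            rw [bFirst_get?] at hv
            rw [mem_take_iff_firstPos]
            exact ⟨v, hv, by rwa [Int.toNat_of_nonneg hk0]⟩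
          refine ⟨hall x0 (by simp), ?_⟩
          intro sEl hs
          obtain ⟨x, hx, rfl⟩ := List.mem_map.mp hs
          rw [PySem.Set.mem_ofList, hslice]
          exact hall x (by simp [hx])
        · simp [if_neg htm] at hq
theorem Tlist_one_le {x0 : List Int} {rest : List (List Int)} {m t : Int}
    (h : t ∈ Tlist x0 rest m) : 1 ≤ t := by
  unfold Tlist at h
  obtain ⟨e, _, hg⟩ := List.mem_filterMap.mp h
  unfold gT at hg
  cases hbt : bT ((x0 :: rest).map bFirst) e with
  | none => rw [hbt] at hg; cases hg
  | some t' =>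
    simp only [hbt] at hg
    by_cases htm : t' ≤ m
    · simp only [if_pos htm, Option.some.injEq] at hg
      subst hg
      exact bT_one_le hbt
    · simp [if_neg htm] at hg
theorem FA_zero (x0 : List Int) (rest : List (List Int)) (m : Int) (hm : 0 ≤ m) :
    FA (x0 :: rest) 0 = 0 := by
  rw [FA_eq_countP x0 rest m 0 le_rfl hm]
  norm_cast
  rw [List.countP_eq_zero]
  intro t ht
  have := Tlist_one_le ht
  simp
  omega
theorem FA_nonneg (ls : List (List Int)) (k : Int) : 0 ≤ FA ls k := by
  simp [FA]

theorem FA_le (x0 : List Int) (rest : List (List Int)) (k : Int) (hk : 0 ≤ k) :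
    FA (x0 :: rest) k ≤ k := by
  unfold FA
  rw [List.map_cons]
  have h1 : ((rest.map (fun x => PySem.Set.ofList (PySem.List.slice x none (some k)))).foldl
      (fun a b => PySem.Set.inter a b) (PySem.Set.ofList (PySem.List.slice x0 none (some k)))).length ≤
      (PySem.Set.ofList (PySem.List.slice x0 none (some k)) : List Int).length := by
    apply length_le_of_nodup_sub
    · exact nodup_foldl_inter _ _ (PySem.Set.nodup_ofList _)
    · exact PySem.Set.nodup_ofList _
    · intro a ha
      exact ((mem_foldl_inter _ _ _).mp ha).1
  have h2 : (PySem.Set.ofList (PySem.List.slice x0 none (some k)) : List Int).length ≤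
      (PySem.List.slice x0 none (some k)).length := PySem.Set.length_ofList_le _
  have h3 : (PySem.List.slice x0 none (some k)).length ≤ k.toNat := by
    rw [PySem.List.slice_to x0 hk]
    simpa using List.length_take_le _ _
  show ((pyInterAll _).length : Int) ≤ k
  have : (pyInterAll (PySem.Set.ofList (PySem.List.slice x0 none (some k)) ::
      rest.map (fun x => PySem.Set.ofList (PySem.List.slice x none (some k))))).length ≤ k.toNat := by
    calc _ ≤ _ := h1
    _ ≤ _ := h2
    _ ≤ _ := h3
  omega
theorem FA_mono (x0 : List Int) (rest : List (List Int)) (m j k : Int)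
    (hj : 0 ≤ j) (hjk : j ≤ k) (hkm : k ≤ m) : FA (x0 :: rest) j ≤ FA (x0 :: rest) k := by
  rw [FA_eq_countP x0 rest m j hj (by omega), FA_eq_countP x0 rest m k (by omega) hkm]
  have : (Tlist x0 rest m).countP (fun t => decide (t ≤ j)) ≤
      (Tlist x0 rest m).countP (fun t => decide (t ≤ k)) := by
    apply List.countP_mono_left
    intro a _ ha
    simp only [decide_eq_true_eq] at *
    omega
  omega
theorem aLoop_succ (ls : List (List Int)) (fuel : Nat) (k : Int) :
    aLoop ls (fuel + 1) k = if FA ls k = k then k else aLoop ls fuel (FA ls k) := rfl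

theorem aLoop_isG (x0 : List Int) (rest : List (List Int)) (m : Int) :
    ∀ (fuel : Nat) (k : Int), 0 ≤ k → k ≤ m → k < (fuel : Int) →
    IsG (x0 :: rest) k (aLoop (x0 :: rest) fuel k) := by
  intro fuel
  induction fuel with
  | zero => intro k h0 _ hf; exfalso; push_cast at hf; omega
  | succ fuel ih =>
    intro k h0 hkm hf
    rw [aLoop_succ]
    by_cases hfix : FA (x0 :: rest) k = k
    · rw [if_pos hfix]
      exact ⟨h0, le_rfl, hfix, fun j _ hj _ => hj⟩
    · rw [if_neg hfix]
      have hle := FA_le x0 rest k h0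
      have hlt : FA (x0 :: rest) k < k := lt_of_le_of_ne hle hfix
      have h0' : 0 ≤ FA (x0 :: rest) k := FA_nonneg _ _
      obtain ⟨a1, a2, a3, a4⟩ := ih (FA (x0 :: rest) k) h0' (by omega) (by push_cast at hf ⊢; omega)
      refine ⟨a1, by omega, a3, ?_⟩
      intro j hj0 hjk hjfix
      have hmono : FA (x0 :: rest) j ≤ FA (x0 :: rest) k := FA_mono x0 rest m j k hj0 hjk hkm
      exact a4 j hj0 (by omega) hjfix
theorem bCounts_fold (ls : List (List Int)) (m : Int) (cand : List Int) :
    ∀ (c0 : PySem.Dict Int Int),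
    cand.foldl (fun c e =>
      match bT (ls.map bFirst) e with
      | none => c
      | some t => if t ≤ m then c.insert t (c.getD t 0 + 1) else c) c0
    = (cand.filterMap (gT ls m)).foldl (fun c t => c.insert t (c.getD t 0 + 1)) c0 := by
  induction cand with
  | nil => intro c0; rfl
  | cons e cand ih =>
    intro c0
    rw [List.foldl_cons, List.filterMap_cons]
    cases hbt : bT (ls.map bFirst) e with
    | none =>
      simp only [hbt]
      rw [show gT ls m e = none from by unfold gT; rw [hbt]]
      exact ih _
    | some t =>
      simp only [hbt]
      by_cases htm : t ≤ m
      · rw [if_pos htm, show gT ls m e = some t from by unfold gT; rw [hbt]; simp [htm]]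
        rw [List.foldl_cons]
        exact ih _
      · rw [if_neg htm, show gT ls m e = none from by unfold gT; rw [hbt]; simp [htm]]
        exact ih _

theorem bCounts_eq_counter (x0 : List Int) (rest : List (List Int)) (m : Int) :
    bCounts ((x0 :: rest).map bFirst) m = PySem.Dict.counter (Tlist x0 rest m) := by
  unfold bCounts
  rw [show ((x0 :: rest).map bFirst).headD PySem.Dict.empty = bFirst x0 from by simp]
  rw [bCounts_fold (x0 :: rest) m]
  rw [PySem.Dict.foldl_insert_getD_add_one_eq_counter]
  rfl
theorem countP_le_succ (l : List Int) (j : Int) :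
    l.countP (fun t => decide (t ≤ j + 1)) = l.countP (fun t => decide (t ≤ j)) + l.count (j + 1) := by
  induction l with
  | nil => simp
  | cons a l ih =>
    simp only [List.countP_cons, List.count_cons, ih]
    by_cases h : a = j + 1
    · subst h; simp; omega
    · by_cases h2 : a ≤ j
      · have h1 : a ≤ j + 1 := by omega
        simp [h, h1, h2]
        omega
      · have h1 : ¬ a ≤ j + 1 := by omega
        simp [h, h1, h2]
theorem FA_succ (x0 : List Int) (rest : List (List Int)) (m j : Int)
    (hj : 0 ≤ j) (hjm : j + 1 ≤ m) :
    FA (x0 :: rest) (j + 1) = FA (x0 :: rest) j + ((Tlist x0 rest m).count (j + 1) : Int) := by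
  rw [FA_eq_countP x0 rest m (j + 1) (by omega) hjm, FA_eq_countP x0 rest m j hj (by omega)]
  rw [countP_le_succ]
  push_cast
  ring

def scanStep (C : PySem.Dict Int Int) (st : Int × Int) (k : Int) : Int × Int :=
  (if st.2 + C.getD k 0 = k then k else st.1, st.2 + C.getD k 0)

theorem scanStep_eq (C : PySem.Dict Int Int) :
    (fun (st : Int × Int) (k : Int) =>
      let full := st.2 + C.getD k 0
      ((if full = k then k else st.1), full)) = scanStep C := rfl

theorem bScan_isG (x0 : List Int) (rest : List (List Int)) (m : Int) (hm : 0 ≤ m) :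
    ∀ (j : Nat), (j : Int) ≤ m →
      ((PySem.List.pyRange 1 ((j : Int) + 1) 1).foldl
        (scanStep (bCounts ((x0 :: rest).map bFirst) m)) ((0 : Int), (0 : Int))).2
        = FA (x0 :: rest) (j : Int) ∧
      IsG (x0 :: rest) (j : Int)
        ((PySem.List.pyRange 1 ((j : Int) + 1) 1).foldl
          (scanStep (bCounts ((x0 :: rest).map bFirst) m)) ((0 : Int), (0 : Int))).1 := by
  intro j
  induction j with
  | zero =>
    intro _
    rw [show (((0 : Nat) : Int) + 1) = (1 : Int) by norm_num]
    rw [show PySem.List.pyRange 1 1 1 = [] from by rw [PySem.List.pyRange_one]; norm_num]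
    simp only [List.foldl_nil]
    refine ⟨(FA_zero x0 rest m hm).symm, le_rfl, le_rfl, FA_zero x0 rest m hm, ?_⟩
    intro j hj0 hj1 _
    omega
  | succ j ih =>
    intro hj
    have hj' : (j : Int) ≤ m := by push_cast at hj ⊢; omega
    obtain ⟨hfull, hisg⟩ := ih hj'
    have hcast : (((j + 1 : Nat)) : Int) = (j : Int) + 1 := by push_cast; ring
    rw [hcast]
    have hrange : PySem.List.pyRange 1 ((j : Int) + 1 + 1) 1 =
        PySem.List.pyRange 1 ((j : Int) + 1) 1 ++ [(j : Int) + 1] :=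
      PySem.List.pyRange_one_succ_right (by omega)
    rw [hrange, List.foldl_append, List.foldl_cons, List.foldl_nil]
    have hcnt : (bCounts ((x0 :: rest).map bFirst) m).getD ((j : Int) + 1) 0 =
        ((Tlist x0 rest m).count ((j : Int) + 1) : Int) := by
      rw [bCounts_eq_counter, PySem.Dict.getD_counter]
    have hX : ((PySem.List.pyRange 1 ((j : Int) + 1) 1).foldl
          (scanStep (bCounts ((x0 :: rest).map bFirst) m)) ((0 : Int), (0 : Int))).2 +
        (bCounts ((x0 :: rest).map bFirst) m).getD ((j : Int) + 1) 0
        = FA (x0 :: rest) ((j : Int) + 1) := by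
      rw [hfull, hcnt, FA_succ x0 rest m j (by positivity) (by push_cast at hj ⊢; omega)]
    rw [show scanStep (bCounts ((x0 :: rest).map bFirst) m)
          ((PySem.List.pyRange 1 ((j : Int) + 1) 1).foldl
            (scanStep (bCounts ((x0 :: rest).map bFirst) m)) ((0 : Int), (0 : Int)))
          ((j : Int) + 1)
        = ((if FA (x0 :: rest) ((j : Int) + 1) = (j : Int) + 1 then (j : Int) + 1
            else ((PySem.List.pyRange 1 ((j : Int) + 1) 1).foldl
              (scanStep (bCounts ((x0 :: rest).map bFirst) m)) ((0 : Int), (0 : Int))).1),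
           FA (x0 :: rest) ((j : Int) + 1)) from by rw [scanStep, hX]]
    constructor
    · rfl
    · by_cases hfix : FA (x0 :: rest) ((j : Int) + 1) = (j : Int) + 1
      · rw [if_pos hfix]
        exact ⟨by positivity, le_rfl, hfix, fun j' _ hj'' _ => hj''⟩
      · rw [if_neg hfix]
        obtain ⟨a1, a2, a3, a4⟩ := hisg
        refine ⟨a1, by omega, a3, ?_⟩
        intro j' hj0 hjle hjfix
        rcases lt_or_eq_of_le hjle with hlt | heq
        · exact a4 j' hj0 (by omega) hjfix
        · exact absurd (heq ▸ hjfix) hfix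
theorem get_num_common_loops_py_spec : Claim_equal_get_num_common_loops_py := by
  intro ls _hdom hpre
  unfold Pre_get_num_common_loops_py at hpre
  obtain ⟨x0, rest, rfl⟩ : ∃ x0 rest, ls = x0 :: rest := by
    cases ls with
    | nil => exact absurd rfl hpre
    | cons a b => exact ⟨a, b, rfl⟩
  unfold Spec_get_num_common_loops_py get_num_common_loops_py get_num_common_loops_py_alt
  cases hmin : PySem.List.min? ((x0 :: rest).map (fun x => (x.length : Int))) (fun v => v) with
  | none =>
    exfalso
    rw [PySem.List.min?_eq_none_iff] at hmin
    simp at hmin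
  | some m =>
    have hm0 : 0 ≤ m := by
      have hmem := PySem.List.min?_mem hmin
      obtain ⟨x, _, rfl⟩ := List.mem_map.mp hmem
      positivity
    have hA : IsG (x0 :: rest) m (aLoop (x0 :: rest) (m.toNat + 1) m) :=
      aLoop_isG x0 rest m (m.toNat + 1) m hm0 le_rfl
        (by push_cast; rw [Int.toNat_of_nonneg hm0]; omega)
    have hB := bScan_isG x0 rest m hm0 m.toNat (by rw [Int.toNat_of_nonneg hm0])
    rw [Int.toNat_of_nonneg hm0] at hB
    simp only [scanStep_eq]
    exact isG_unique hA hB.2
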